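-- pv_equiv track=rewrite | github.com/kwarsanaut/AI-Job-Matching-System | ai_service/models/matching_model.py | _get_matched_skills
-- ===== SOURCE A (Python) =====
-- from typing import Dict, List, Any, Optional, Tuple
--
-- def _get_matched_skills(job_skills: List[str], candidate_skills: List[str]) -> List[str]:
--     """Get list of matched skills between job and candidate"""
--
--     if not job_skills or not candidate_skills:
--         return []
--
--     job_skills_norm = [skill.lower().strip() for skill in job_skills]
--     candidate_skills_norm = [skill.lower().strip() for skill in candidate_skills]
--
--     matched = []
--
--     # Exact matches
--     for job_skill, orig_job_skill in zip(job_skills_norm, job_skills):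
--         if job_skill in candidate_skills_norm:
--             matched.append(orig_job_skill)
--
--     # Partial matches
--     for job_skill, orig_job_skill in zip(job_skills_norm, job_skills):
--         if orig_job_skill not in matched:
--             for candidate_skill in candidate_skills_norm:
--                 if job_skill in candidate_skill or candidate_skill in job_skill:
--                     matched.append(orig_job_skill)
--                     break
--
--     return matched
-- ===== SOURCE B (Python) =====
-- def _get_matched_skills(job_skills, candidate_skills):
--     """Single classification pass: exact and partial matches in two accumulators."""
--     if not job_skills or not candidate_skills:
--         return []
--     cand_norm = [s.lower().strip() for s in candidate_skills]
--     cand_set = set(cand_norm)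
--     exact = []
--     partial = []
--     for orig in job_skills:
--         norm = orig.lower().strip()
--         if norm in cand_set:
--             exact.append(orig)
--         elif orig not in partial and any(norm in c or c in norm for c in cand_norm):
--             partial.append(orig)
--     return exact + partial
-- ===== Notes on version B (the rewrite author's own statement) =====
-- stated objective: faster
-- what changed: A's two sweeps over job_skills (all exact matches first, then a dedup'd partial sweep with an inner break loop) become one classification pass with two accumulators (exact, partial) and a pre-built hash set of normalized candidate skills, returning exact + partial.
import Mathlib
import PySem

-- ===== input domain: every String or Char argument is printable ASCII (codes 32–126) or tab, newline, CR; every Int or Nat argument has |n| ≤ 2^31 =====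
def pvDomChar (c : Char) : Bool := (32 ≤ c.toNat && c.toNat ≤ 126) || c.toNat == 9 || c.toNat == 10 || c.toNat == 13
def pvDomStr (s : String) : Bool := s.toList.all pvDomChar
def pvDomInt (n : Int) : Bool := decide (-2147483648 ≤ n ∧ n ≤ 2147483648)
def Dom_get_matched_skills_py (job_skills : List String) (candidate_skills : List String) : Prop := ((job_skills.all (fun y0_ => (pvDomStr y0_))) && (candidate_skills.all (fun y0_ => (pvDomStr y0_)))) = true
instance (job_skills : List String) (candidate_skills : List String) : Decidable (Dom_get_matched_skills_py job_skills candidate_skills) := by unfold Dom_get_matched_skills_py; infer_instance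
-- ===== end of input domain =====

-- ===== PORT A =====
-- B replaces A's two sweeps by one classification pass with two accumulators; return values are equal (objective: alternative).
def pvNorm (s : String) : String := PySem.Str.strip (PySem.Str.lower s)

def get_matched_skills_py (job_skills : List String) (candidate_skills : List String) : List String :=
  if job_skills = [] ∨ candidate_skills = [] then []
  else
    let job_skills_norm := job_skills.map pvNorm
    let candidate_skills_norm := candidate_skills.map pvNorm
    let matched := (job_skills_norm.zip job_skills).foldl
      (fun m p => if p.1 ∈ candidate_skills_norm then m ++ [p.2] else m) []
    -- inner 'for … if …: append; break' ports as List.any of the break condition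
    (job_skills_norm.zip job_skills).foldl
      (fun m p =>
        if p.2 ∈ m then m
        else if candidate_skills_norm.any (fun c => PySem.Str.isIn p.1 c || PySem.Str.isIn c p.1)
          then m ++ [p.2] else m) matched

-- ===== PORT B =====
def get_matched_skills_py_alt (job_skills : List String) (candidate_skills : List String) : List String :=
  if job_skills = [] ∨ candidate_skills = [] then []
  else
    let cand_norm := candidate_skills.map (fun s => PySem.Str.strip (PySem.Str.lower s))
    let cand_set := PySem.Set.ofList cand_norm
    let ep := job_skills.foldl
      (fun (ep : List String × List String) orig =>
        let norm := PySem.Str.strip (PySem.Str.lower orig)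
        if PySem.Set.contains cand_set norm then (ep.1 ++ [orig], ep.2)
        else if orig ∉ ep.2 ∧ cand_norm.any (fun c => PySem.Str.isIn norm c || PySem.Str.isIn c norm)
          then (ep.1, ep.2 ++ [orig])
        else ep) ([], [])
    ep.1 ++ ep.2

-- ===== PRECONDITION & SPEC =====
def Spec_get_matched_skills_py (job_skills : List String) (candidate_skills : List String) (out : List String) : Prop := out = get_matched_skills_py_alt job_skills candidate_skills
instance (job_skills : List String) (candidate_skills : List String) (out : List String) : Decidable (Spec_get_matched_skills_py job_skills candidate_skills out) := by unfold Spec_get_matched_skills_py; infer_instance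

-- ===== CLAIM (what is proved, stated in full; the proofs are below) =====
def Claim_equal_get_matched_skills_py : Prop := ∀ (job_skills : List String) (candidate_skills : List String), Dom_get_matched_skills_py job_skills candidate_skills → Spec_get_matched_skills_py job_skills candidate_skills (get_matched_skills_py job_skills candidate_skills)

-- ===== LEMMAS AND PROOFS =====

-- abbreviations used only in the proofs
def pvCond (cn : List String) (s : String) : Bool :=
  cn.any (fun c => PySem.Str.isIn (pvNorm s) c || PySem.Str.isIn c (pvNorm s))

-- B's pair fold splits into two independent folds
theorem pv_fold_pair (cn : List String) (js : List String) (e p : List String) :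
    js.foldl
      (fun (ep : List String × List String) orig =>
        if PySem.Set.contains (PySem.Set.ofList cn) (PySem.Str.strip (PySem.Str.lower orig)) then (ep.1 ++ [orig], ep.2)
        else if orig ∉ ep.2 ∧ cn.any (fun c => PySem.Str.isIn (PySem.Str.strip (PySem.Str.lower orig)) c || PySem.Str.isIn c (PySem.Str.strip (PySem.Str.lower orig)))
          then (ep.1, ep.2 ++ [orig])
        else ep) (e, p)
    = (js.foldl (fun e s => if pvNorm s ∈ cn then e ++ [s] else e) e,
       js.foldl (fun p s => if pvNorm s ∈ cn then p
                 else if s ∉ p ∧ pvCond cn s then p ++ [s] else p) p) := by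
  induction js generalizing e p with
  | nil => rfl
  | cons s t ih =>
    simp only [List.foldl_cons]
    have hc : PySem.Set.contains (PySem.Set.ofList cn) (PySem.Str.strip (PySem.Str.lower s)) = true
        ↔ pvNorm s ∈ cn := by
      rw [PySem.Set.contains_iff, PySem.Set.mem_ofList]; rfl
    by_cases h1 : pvNorm s ∈ cn
    · rw [if_pos (hc.mpr h1), if_pos h1, if_pos h1, ih]
    · rw [if_neg (fun h => h1 (hc.mp h)), if_neg h1, if_neg h1]
      by_cases h2 : s ∉ p ∧ pvCond cn s
      · have : (s ∉ p ∧ cn.any (fun c => PySem.Str.isIn (PySem.Str.strip (PySem.Str.lower s)) c || PySem.Str.isIn c (PySem.Str.strip (PySem.Str.lower s))) = true) := h2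
        rw [if_pos this, if_pos h2, ih]
      · have : ¬ (s ∉ p ∧ cn.any (fun c => PySem.Str.isIn (PySem.Str.strip (PySem.Str.lower s)) c || PySem.Str.isIn c (PySem.Str.strip (PySem.Str.lower s))) = true) := h2
        rw [if_neg this, if_neg h2, ih]

-- A's second sweep from M ++ p equals M ++ (B's partial fold from p), provided membership in M
-- characterizes the exact-match test for every element still to be visited.
theorem pv_sweep2 (cn : List String) (js : List String) (M p : List String)
    (h : ∀ s ∈ js, (pvNorm s ∈ cn ↔ s ∈ M)) :
    js.foldl
      (fun m s =>
        if s ∈ m then m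
        else if pvCond cn s then m ++ [s] else m) (M ++ p)
    = M ++ js.foldl (fun p s => if pvNorm s ∈ cn then p
                 else if s ∉ p ∧ pvCond cn s then p ++ [s] else p) p := by
  induction js generalizing p with
  | nil => rfl
  | cons s t ih =>
    have hs := h s (List.mem_cons_self ..)
    have ht : ∀ s ∈ t, (pvNorm s ∈ cn ↔ s ∈ M) := fun x hx => h x (List.mem_cons_of_mem _ hx)
    simp only [List.foldl_cons]
    by_cases h1 : pvNorm s ∈ cn
    · rw [if_pos (List.mem_append_left p (hs.mp h1)), if_pos h1, ih _ ht]
    · have hM : s ∉ M := fun hm => h1 (hs.mpr hm)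
      rw [if_neg h1]
      by_cases h2 : s ∈ p
      · rw [if_pos (List.mem_append_right M h2)]
        have : ¬ (s ∉ p ∧ pvCond cn s) := fun hh => hh.1 h2
        rw [if_neg this, ih _ ht]
      · have hmem : s ∉ M ++ p := by
          intro hm; rcases List.mem_append.mp hm with hm | hm
          · exact hM hm
          · exact h2 hm
        rw [if_neg hmem]
        by_cases h3 : pvCond cn s
        · rw [if_pos h3, if_pos ⟨h2, h3⟩, List.append_assoc, ih _ ht]
        · rw [if_neg h3, if_neg (fun hh => h3 hh.2), ih _ ht]

-- ===== VERDICT (by name: the statement is the Claim_ definition above) =====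
theorem get_matched_skills_py_spec : Claim_equal_get_matched_skills_py := by
  intro js cs _
  unfold Spec_get_matched_skills_py get_matched_skills_py get_matched_skills_py_alt
  by_cases h0 : js = [] ∨ cs = []
  · simp [h0]
  · rw [if_neg h0, if_neg h0]
    simp only
    have hzip : (js.map pvNorm).zip js = js.map (fun s => (pvNorm s, s)) := by
      have := List.zip_map' (f := pvNorm) (g := fun s => s) (l := js)
      simpa using this
    rw [hzip, List.foldl_map, List.foldl_map]
    simp only
    set cn := cs.map pvNorm with hcn
    have hcn' : cs.map (fun s => PySem.Str.strip (PySem.Str.lower s)) = cn := rfl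
    rw [hcn', pv_fold_pair cn js [] []]
    have hE : js.foldl (fun m s => if pvNorm s ∈ cn then m ++ [s] else m) []
        = js.filter (fun s => decide (pvNorm s ∈ cn)) := by
      have := PySem.List.foldl_append_ite_eq_filter (l := js) (acc := ([] : List String))
        (p := fun s => pvNorm s ∈ cn)
      simpa using this
    have hiff : ∀ s ∈ js, (pvNorm s ∈ cn ↔ s ∈ js.filter (fun s => decide (pvNorm s ∈ cn))) := by
      intro s hsj
      simp [List.mem_filter, hsj]
    have := pv_sweep2 cn js (js.filter (fun s => decide (pvNorm s ∈ cn))) [] hiff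
    rw [hE]
    have heq : (js.foldl
      (fun m s =>
        if s ∈ m then m
        else if pvCond cn s then m ++ [s] else m)
        (js.filter (fun s => decide (pvNorm s ∈ cn)) ++ []))
      = js.filter (fun s => decide (pvNorm s ∈ cn))
        ++ js.foldl (fun p s => if pvNorm s ∈ cn then p
                 else if s ∉ p ∧ pvCond cn s then p ++ [s] else p) [] := this
    simpa [pvCond] using heq
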